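-- pv_equiv track=rewrite | github.com/adventurebrew/kolminey | bass/rnccs.py | gen_crc
-- ===== SOURCE A (Python) =====
-- def gen_crc(crc):
--     for _ in range(8):
--         if crc & 1:
--             crc = (crc >> 1) ^ 0xA001
--         else:
--             crc >>= 1
--     assert crc & 0xFFFF == crc, crc
--     return crc
-- ===== SOURCE B (Python) =====
-- _CRC_TABLE = []
-- for _b in range(256):
--     _v = _b
--     for _ in range(8):
--         _v = ((_v >> 1) ^ 0xA001) if (_v & 1) else (_v >> 1)
--     _CRC_TABLE.append(_v)
--
--
-- def gen_crc(crc):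
--     crc = (crc >> 8) ^ _CRC_TABLE[crc & 0xFF]
--     assert crc & 0xFFFF == crc, crc
--     return crc
-- ===== Notes on version B (the rewrite author's own statement) =====
-- stated objective: idiomatic
-- what changed: Replaces the 8-iteration bitwise shift loop per call by a module-level 256-entry CRC table and a single '(crc >> 8) ^ table[crc & 0xFF]' lookup, valid because the CRC step is GF(2)-linear.
import Mathlib
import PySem

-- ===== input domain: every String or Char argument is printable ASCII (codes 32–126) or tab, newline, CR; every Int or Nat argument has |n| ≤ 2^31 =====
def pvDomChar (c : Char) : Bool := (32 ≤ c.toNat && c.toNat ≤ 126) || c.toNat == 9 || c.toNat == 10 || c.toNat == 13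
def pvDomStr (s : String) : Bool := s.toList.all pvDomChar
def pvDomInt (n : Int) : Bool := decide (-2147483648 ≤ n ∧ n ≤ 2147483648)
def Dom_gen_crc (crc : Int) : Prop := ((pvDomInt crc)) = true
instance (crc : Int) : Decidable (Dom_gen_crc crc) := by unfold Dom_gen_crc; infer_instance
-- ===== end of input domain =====

-- B replaces A's per-call 8-step shift loop by a precomputed 256-entry CRC table and a single
-- '(crc >> 8) ^ table[crc & 0xFF]' lookup (idiomatic table-driven CRC); the final assert is the same.

-- ===== PORT A =====
-- the trailing 'assert crc & 0xFFFF == crc' raises exactly outside Pre_gen_crc; under Pre_ it is a no-op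
def gen_crc (crc : Int) : Int :=
  (PySem.List.pyRange 0 8 1).foldl
    (fun c _ => if PySem.Int.band c 1 ≠ 0 then PySem.Int.bxor (c >>> (1:Nat)) 0xA001 else c >>> (1:Nat)) crc

-- ===== PORT B =====
-- module-level table loop of Source B: for _b in range(256): 8 shift steps, append
def crcTable : List Int :=
  (PySem.List.pyRange 0 256 1).foldl
    (fun acc b =>
      acc ++ [(PySem.List.pyRange 0 8 1).foldl
        (fun v _ => if PySem.Int.band v 1 ≠ 0 then PySem.Int.bxor (v >>> (1:Nat)) 0xA001 else v >>> (1:Nat)) b]) []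

-- the index crc & 0xFF is always in [0, 256), so the .getD 0 default is never taken;
-- the same trailing assert raises exactly outside Pre_gen_crc
def gen_crc_alt (crc : Int) : Int :=
  PySem.Int.bxor (crc >>> (8:Nat)) ((PySem.List.pyGet? crcTable (PySem.Int.band crc 0xFF)).getD 0)

-- ===== PRECONDITION & SPEC =====
-- exactly the inputs on which Python A returns: for crc < 0 or crc ≥ 2^24 the final
-- 'assert crc & 0xFFFF == crc' fails (AssertionError) in both A and B
def Pre_gen_crc (crc : Int) : Prop := 0 ≤ crc ∧ crc < 16777216
instance (crc : Int) : Decidable (Pre_gen_crc crc) := by unfold Pre_gen_crc; infer_instance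
def pvWitness_gen_crc : Int := (4660)

def Spec_gen_crc (crc : Int) (out : Int) : Prop := out = gen_crc_alt crc
instance (crc : Int) (out : Int) : Decidable (Spec_gen_crc crc out) := by unfold Spec_gen_crc; infer_instance

-- ===== CLAIM (what is proved, stated in full; the proofs are below) =====
def Claim_equal_gen_crc : Prop := ∀ (crc : Int), Dom_gen_crc crc → Pre_gen_crc crc → Spec_gen_crc crc (gen_crc crc)

-- ===== LEMMAS AND PROOFS =====

-- one CRC shift step on Nat (the nonnegative image of both ports' step)
def natStep (n : Nat) : Nat := if n &&& 1 ≠ 0 then (n >>> 1) ^^^ 0xA001 else n >>> 1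

theorem intStep_cast (n : Nat) :
    (if PySem.Int.band (n : Int) 1 ≠ 0 then PySem.Int.bxor ((n : Int) >>> (1:Nat)) 0xA001 else (n : Int) >>> (1:Nat))
      = ((natStep n : Nat) : Int) := by
  have hb : PySem.Int.band (n : Int) 1 = ((n &&& 1 : Nat) : Int) := by
    simpa using PySem.Int.band_natCast n 1
  have hs : ((n : Int) >>> (1 : Nat)) = ((n >>> 1 : Nat) : Int) := by simp
  have hx : PySem.Int.bxor ((n >>> 1 : Nat) : Int) 0xA001 = (((n >>> 1) ^^^ 0xA001 : Nat) : Int) := by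
    simpa using PySem.Int.bxor_natCast (n >>> 1) 0xA001
  unfold natStep
  rw [hb, hs]
  rcases Nat.eq_zero_or_pos (n &&& 1) with h | h
  · rw [if_neg (by simp [h]), if_neg (by simp [h])]
  · have h0 : (n &&& 1) ≠ 0 := by omega
    have hi : ((n &&& 1 : Nat) : Int) ≠ 0 := by exact_mod_cast h0
    rw [if_pos hi, if_pos h0, hx]

theorem fold8_cast (n : Nat) :
    (PySem.List.pyRange 0 8 1).foldl
      (fun c _ => if PySem.Int.band c 1 ≠ 0 then PySem.Int.bxor (c >>> (1:Nat)) 0xA001 else c >>> (1:Nat)) (n : Int)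
      = ((natStep^[8] n : Nat) : Int) := by
  have hr : PySem.List.pyRange 0 8 1 = [0,1,2,3,4,5,6,7] := by decide
  rw [hr]
  simp only [List.foldl_cons, List.foldl_nil]
  rw [intStep_cast, intStep_cast, intStep_cast, intStep_cast,
      intStep_cast, intStep_cast, intStep_cast, intStep_cast]
  rfl

-- shift/XOR distribution for one step: high part passes through shifted
theorem natStep_highxor (m h s : Nat) :
    natStep (2 ^ (m + 1) * h ^^^ s) = 2 ^ m * h ^^^ natStep s := by
  have hbit : (2 ^ (m + 1) * h ^^^ s) &&& 1 = s &&& 1 := by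
    have h2 : 2 ^ (m + 1) * h = 2 * (2 ^ m * h) := by ring
    rw [Nat.and_one_is_mod, Nat.and_one_is_mod]
    have h1 : (2 ^ (m + 1) * h ^^^ s).testBit 0 = s.testBit 0 := by
      simp
      omega
    simp only [Nat.testBit_zero, decide_eq_decide] at h1
    omega
  have hshift : (2 ^ (m + 1) * h ^^^ s) >>> 1 = 2 ^ m * h ^^^ (s >>> 1) := by
    apply Nat.eq_of_testBit_eq
    intro i
    simp only [Nat.testBit_shiftRight, Nat.testBit_xor, Nat.testBit_two_pow_mul]
    have hd : (decide (m + 1 ≤ 1 + i)) = (decide (m ≤ i)) := by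
      by_cases hmi : m ≤ i <;> simp [hmi] <;> omega
    have he : 1 + i - (m + 1) = i - m := by omega
    rw [hd, he]
  unfold natStep
  rw [hbit, hshift]
  by_cases hc : s &&& 1 ≠ 0
  · rw [if_pos hc, if_pos hc, Nat.xor_assoc]
  · rw [if_neg hc, if_neg hc]

theorem iterate8_highxor (h l : Nat) :
    natStep^[8] (2 ^ 8 * h ^^^ l) = h ^^^ natStep^[8] l := by
  have s8 := natStep_highxor 7 h l
  have s7 := natStep_highxor 6 h (natStep l)
  have s6 := natStep_highxor 5 h (natStep^[2] l)
  have s5 := natStep_highxor 4 h (natStep^[3] l)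
  have s4 := natStep_highxor 3 h (natStep^[4] l)
  have s3 := natStep_highxor 2 h (natStep^[5] l)
  have s2 := natStep_highxor 1 h (natStep^[6] l)
  have s1 := natStep_highxor 0 h (natStep^[7] l)
  show natStep (natStep (natStep (natStep (natStep (natStep (natStep (natStep (2 ^ 8 * h ^^^ l)))))))) = _
  simp only [Function.iterate_succ, Function.iterate_zero, Function.comp_apply, id_eq] at s1 s2 s3 s4 s5 s6 s7 s8 ⊢
  rw [s8, s7, s6, s5, s4, s3, s2, s1]
  simp

-- every Nat splits as (high bits shifted in) XOR (low byte)
theorem split_byte (n : Nat) : 2 ^ 8 * (n >>> 8) ^^^ (n &&& 255) = n := by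
  apply Nat.eq_of_testBit_eq
  intro i
  have h255 : (255 : Nat).testBit i = decide (i < 8) := by
    simpa using Nat.testBit_two_pow_sub_one 8 i
  simp only [Nat.testBit_xor, Nat.testBit_two_pow_mul, Nat.testBit_shiftRight, Nat.testBit_and, h255]
  by_cases hi : 8 ≤ i
  · have : ¬ i < 8 := by omega
    have he : 8 + (i - 8) = i := by omega
    simp [hi, this, he]
  · have : i < 8 := by omega
    simp [hi, this]

-- A's port on a nonnegative input computes the 8-fold Nat step
theorem genA_cast (n : Nat) : gen_crc (n : Int) = ((natStep^[8] n : Nat) : Int) := by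
  unfold gen_crc; exact fold8_cast n

-- the table is the list of 8-fold step values of 0..255
theorem crcTable_eq : crcTable = (List.range 256).map (fun k => ((natStep^[8] k : Nat) : Int)) := by
  unfold crcTable
  rw [PySem.List.foldl_append_singleton_eq_map]
  rw [PySem.List.pyRange_one 0 256, List.map_map]
  apply List.map_congr_left
  intro k _
  simp only [Function.comp_apply, Int.zero_add]
  exact fold8_cast k

theorem table_lookup (k : Nat) (hk : k < 256) :
    (PySem.List.pyGet? crcTable (k : Int)).getD 0 = ((natStep^[8] k : Nat) : Int) := by
  rw [crcTable_eq, PySem.List.pyGet?_natCast]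
  rw [List.getElem?_map]
  have : (List.range 256)[k]? = some k := by
    simp [List.getElem?_range hk]
  rw [this]
  rfl

-- B's port on a nonnegative input
theorem genB_cast (n : Nat) : gen_crc_alt (n : Int) = (((n >>> 8) ^^^ natStep^[8] (n &&& 255) : Nat) : Int) := by
  unfold gen_crc_alt
  have hb : PySem.Int.band (n : Int) 0xFF = ((n &&& 255 : Nat) : Int) := by
    simpa using PySem.Int.band_natCast n 255
  have hlt : n &&& 255 < 256 := by
    have := Nat.and_le_right (n := n) (m := 255); omega
  have hs : ((n : Int) >>> (8 : Nat)) = ((n >>> 8 : Nat) : Int) := by simp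
  rw [hb, table_lookup _ hlt, hs]
  simpa using PySem.Int.bxor_natCast (n >>> 8) (natStep^[8] (n &&& 255))

-- ===== VERDICT (by name: the statement is the Claim_ definition above) =====
theorem gen_crc_spec : Claim_equal_gen_crc := by
  intro crc _ hpre
  unfold Spec_gen_crc
  obtain ⟨hnn, _⟩ := hpre
  obtain ⟨n, rfl⟩ := Int.eq_ofNat_of_zero_le hnn
  rw [genA_cast, genB_cast]
  have := iterate8_highxor (n >>> 8) (n &&& 255)
  rw [split_byte] at this
  exact congrArg _ this
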